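-- pv_equiv track=rewrite | github.com/Cyfrin/clearsig | clearsig/_generate.py | _to_title
-- ===== SOURCE A (Python) =====
-- def _to_title(name: str) -> str:
--     """Convert a parameter name like `_amountIn` or `to_address` to a Title Case label."""
--     if not name:
--         return ""
--     stripped = name.lstrip("_")
--     words: list[str] = []
--     current = ""
--     for ch in stripped:
--         if ch == "_":
--             if current:
--                 words.append(current)
--                 current = ""
--         elif ch.isupper() and current and not current[-1].isupper():
--             words.append(current)
--             current = ch
--         else:
--             current += ch
--     if current:
--         words.append(current)
--     return " ".join(w[:1].upper() + w[1:] for w in words) if words else stripped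
-- ===== SOURCE B (Python) =====
-- def _to_title(name: str) -> str:
--     """Convert a parameter name like `_amountIn` or `to_address` to a Title Case label."""
--     s = name.lstrip("_")
--     # Mark each camelCase boundary with '_' by looking at adjacent character pairs,
--     # then split on underscores, drop empty pieces, capitalize first letters, join.
--     marked = s[:1] + "".join(
--         ("_" + c) if (c.isupper() and p != "_" and not p.isupper()) else c
--         for p, c in zip(s, s[1:])
--     )
--     words = [w for w in marked.split("_") if w]
--     return " ".join(w[:1].upper() + w[1:] for w in words)
-- ===== Notes on version B (the rewrite author's own statement) =====
-- stated objective: idiomatic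
-- what changed: Replaced A's char-by-char state machine (explicit current-word accumulator with three branch cases) by a declarative pipeline: mark each camelCase boundary with a separator via a pairwise zip over adjacent characters, then split on separators, drop empty pieces, capitalize first letters and join.
import Mathlib
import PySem

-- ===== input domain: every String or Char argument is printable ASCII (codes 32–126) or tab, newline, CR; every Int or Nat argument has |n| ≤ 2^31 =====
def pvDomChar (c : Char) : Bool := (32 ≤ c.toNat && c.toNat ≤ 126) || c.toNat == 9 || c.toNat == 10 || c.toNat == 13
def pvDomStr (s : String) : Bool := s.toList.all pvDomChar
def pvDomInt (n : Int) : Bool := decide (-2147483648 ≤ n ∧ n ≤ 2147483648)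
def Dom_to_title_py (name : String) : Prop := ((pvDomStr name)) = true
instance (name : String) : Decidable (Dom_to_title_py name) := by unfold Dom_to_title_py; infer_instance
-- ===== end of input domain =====

-- B replaces A's char-by-char state machine by a mark-split pipeline (insert '_' at camelCase
-- boundaries via pairwise zip, split on '_', capitalize, join): idiomatic, no accumulator state.


-- ===== PORT A =====
-- the loop body of A's for-loop, on state (words, current)
def to_title_stepA (st : List (List Char) × List Char) (ch : Char) : List (List Char) × List Char :=
  if ch = '_' then
    if st.2 ≠ [] then (st.1 ++ [st.2], []) else st
  else if PySem.Chars.isupper ch = true ∧ st.2 ≠ [] ∧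
          PySem.Chars.isupper (PySem.List.pyGetD st.2 (-1) ' ') = false then
    -- current[-1]: guarded by `current` being nonempty, so pyGetD's default is never read
    (st.1 ++ [st.2], [ch])
  else
    (st.1, st.2 ++ [ch])

-- w[:1].upper() + w[1:]  (slices with nonnegative bounds: take/drop are exact)
def to_title_capA (w : List Char) : List Char := PySem.Chars.upper (w.take 1) ++ w.drop 1

def to_title_py (name : String) : String :=
  if name.toList = [] then ""
  else
    -- name.lstrip("_") strips exactly the leading run of '_' (exact: dropWhile)
    let stripped := name.toList.dropWhile (· == '_')
    let st := stripped.foldl to_title_stepA ([], [])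
    let words := if st.2 ≠ [] then st.1 ++ [st.2] else st.1
    if words ≠ [] then String.ofList (PySem.Chars.join [' '] (words.map to_title_capA))
    else String.ofList stripped

-- ===== PORT B =====
-- the per-pair marker of B's zip comprehension
def to_title_mark (p c : Char) : List Char :=
  if PySem.Chars.isupper c = true ∧ p ≠ '_' ∧ PySem.Chars.isupper p = false then ['_', c]
  else [c]

def to_title_py_alt (name : String) : String :=
  let s := name.toList.dropWhile (· == '_')        -- name.lstrip("_"), exact: dropWhile
  -- s[:1] + "".join(("_" + c) if … else c for p, c in zip(s, s[1:]))
  let marked := s.take 1 ++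
    PySem.Chars.join [] ((s.zip (s.drop 1)).map fun pc => to_title_mark pc.1 pc.2)
  -- marked.split("_"): single-char str.split ported as List.splitOnP (exact)
  let words := (List.splitOnP (fun c => c == '_') marked).filter (fun w => !w.isEmpty)
  String.ofList (PySem.Chars.join [' '] (words.map fun w => PySem.Chars.upper (w.take 1) ++ w.drop 1))

-- ===== PRECONDITION & SPEC =====
def Spec_to_title_py (name : String) (out : String) : Prop := out = to_title_py_alt name
instance (name : String) (out : String) : Decidable (Spec_to_title_py name out) := by unfold Spec_to_title_py; infer_instance

-- ===== CLAIM (what is proved, stated in full; the proofs are below) =====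
def Claim_equal_to_title_py : Prop := ∀ (name : String), Dom_to_title_py name → Spec_to_title_py name (to_title_py name)

-- ===== LEMMAS AND PROOFS =====

-- invariant linking A's `current` with B's previous character: when the current word is empty the
-- previous character was '_' (or the start); otherwise it is the word's last character
def pvInv (prev : Char) (cur : List Char) : Prop :=
  if cur = [] then prev = '_' else cur.getLast? = some prev ∧ '_' ∉ cur

-- reference tokenizer: the word list both programs build, reading one char at a time
def pvW (cur : List Char) (prev : Char) : List Char → List (List Char)
  | [] => if cur = [] then [] else [cur]
  | c :: r =>
    if c = '_' then (if cur = [] then pvW [] '_' r else cur :: pvW [] '_' r)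
    else if PySem.Chars.isupper c = true ∧ cur ≠ [] ∧ PySem.Chars.isupper prev = false then
      cur :: pvW [c] c r
    else pvW (cur ++ [c]) c r

lemma pvW_ne_nil (l : List Char) : ∀ cur prev, cur ≠ [] → pvW cur prev l ≠ [] := by
  induction l with
  | nil => intro cur prev h; simp [pvW, h]
  | cons c r ih =>
    intro cur prev h
    by_cases h1 : c = '_'
    · simp [pvW, h1, h]
    · simp only [pvW, if_neg h1]
      split_ifs
      · simp
      · exact ih _ _ (by simp)

-- A's fold, started from any state satisfying the invariant, produces pvW's words
lemma pvA_fold (l : List Char) : ∀ (ws : List (List Char)) (cur : List Char) (prev : Char),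
    pvInv prev cur →
    (if (List.foldl to_title_stepA (ws, cur) l).2 ≠ []
      then (List.foldl to_title_stepA (ws, cur) l).1 ++ [(List.foldl to_title_stepA (ws, cur) l).2]
      else (List.foldl to_title_stepA (ws, cur) l).1) = ws ++ pvW cur prev l := by
  induction l with
  | nil =>
    intro ws cur prev _
    by_cases h : cur = [] <;> simp [pvW, h]
  | cons c r ih =>
    intro ws cur prev hinv
    rw [List.foldl_cons]
    by_cases hc : c = '_'
    · subst hc
      by_cases hcur : cur = []
      · subst hcur
        have hprev : prev = '_' := by simpa [pvInv] using hinv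
        subst hprev
        have hstep : to_title_stepA (ws, []) '_' = (ws, []) := by simp [to_title_stepA]
        rw [hstep, ih ws [] '_' (by simp [pvInv])]
        have : pvW ([] : List Char) '_' ('_' :: r) = pvW [] '_' r := by simp [pvW]
        rw [this]
      · have hstep : to_title_stepA (ws, cur) '_' = (ws ++ [cur], []) := by
          simp [to_title_stepA, hcur]
        rw [hstep, ih (ws ++ [cur]) [] '_' (by simp [pvInv])]
        have : pvW cur prev ('_' :: r) = cur :: pvW [] '_' r := by simp [pvW, hcur]
        rw [this]; simp
    · by_cases hcur : cur = []
      · subst hcur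
        have hstep : to_title_stepA (ws, []) c = (ws, [c]) := by simp [to_title_stepA, hc]
        rw [hstep, ih ws [c] c (by simp [pvInv, Ne.symm hc])]
        have : pvW ([] : List Char) prev (c :: r) = pvW [c] c r := by
          simp [pvW, hc]
        rw [this]
      · have hpair : cur.getLast? = some prev ∧ '_' ∉ cur := by
          have h2 := hinv; rw [pvInv, if_neg hcur] at h2; exact h2
        obtain ⟨hlast, hmem⟩ := hpair
        have hget : PySem.List.pyGetD cur (-1) ' ' = prev := by
          rw [PySem.List.pyGetD_neg_one (h := hcur)]
          rw [List.getLast?_eq_some_getLast hcur] at hlast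
          exact Option.some.inj hlast
        by_cases hP : PySem.Chars.isupper c = true ∧ PySem.Chars.isupper prev = false
        · have hstep : to_title_stepA (ws, cur) c = (ws ++ [cur], [c]) := by
            simp only [to_title_stepA, if_neg hc, hget]
            rw [if_pos ⟨hP.1, hcur, hP.2⟩]
          rw [hstep, ih (ws ++ [cur]) [c] c (by simp [pvInv, Ne.symm hc])]
          have : pvW cur prev (c :: r) = cur :: pvW [c] c r := by
            simp only [pvW, if_neg hc]
            rw [if_pos ⟨hP.1, hcur, hP.2⟩]
          rw [this]; simp
        · have hno : ¬ (PySem.Chars.isupper c = true ∧ cur ≠ [] ∧ PySem.Chars.isupper prev = false) := by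
            rintro ⟨h1, _, h3⟩; exact hP ⟨h1, h3⟩
          have hstep : to_title_stepA (ws, cur) c = (ws, cur ++ [c]) := by
            simp only [to_title_stepA, if_neg hc, hget]
            rw [if_neg hno]
          rw [hstep, ih ws (cur ++ [c]) c
            (by simp [pvInv, hmem, Ne.symm hc])]
          have : pvW cur prev (c :: r) = pvW (cur ++ [c]) c r := by
            simp only [pvW, if_neg hc]
            rw [if_neg hno]
          rw [this]

-- "".join of the marked pieces equals a direct previous-char recursion
def pvGomark (prev : Char) : List Char → List Char
  | [] => []
  | c :: r => to_title_mark prev c ++ pvGomark c r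

lemma pvJoin_nil (l : List (List Char)) : PySem.Chars.join [] l = l.flatten := by
  simp only [PySem.Chars.join, List.intercalate]
  induction l with
  | nil => simp
  | cons a t ih => cases t <;> simp_all [List.intersperse]

lemma pvGomark_eq (r : List Char) : ∀ p,
    PySem.Chars.join [] ((List.zip (p :: r) r).map fun pc => to_title_mark pc.1 pc.2)
      = pvGomark p r := by
  induction r with
  | nil => intro p; simp [pvGomark]
  | cons c r' ih =>
    intro p
    simp only [List.zip_cons_cons, List.map_cons, pvJoin_nil, List.flatten_cons, pvGomark]
    rw [← pvJoin_nil, ih c]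

-- splitting at the first separator, past a separator-free prefix
lemma pvSplit_sep (xs : List Char) (ys : List Char) (h : '_' ∉ xs) :
    List.splitOnP (fun c => c == '_') (xs ++ '_' :: ys)
      = xs :: List.splitOnP (fun c => c == '_') ys := by
  induction xs with
  | nil => simp [List.splitOnP_cons]
  | cons x t ih =>
    have hxne : x ≠ '_' := fun hEq => h (by simp [hEq])
    have hx : (x == '_') = false := by simp [hxne]
    have ht : '_' ∉ t := fun hm => h (List.mem_cons_of_mem _ hm)
    rw [List.cons_append, List.splitOnP_cons, hx, if_neg (by simp), ih ht,
      List.modifyHead_cons]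

-- B's split-and-filter of the marked text, from any invariant state, produces pvW's words
lemma pvB_split (l : List Char) : ∀ (cur : List Char) (prev : Char), pvInv prev cur →
    (List.splitOnP (fun c => c == '_') (cur ++ pvGomark prev l)).filter (fun w => !w.isEmpty)
      = pvW cur prev l := by
  induction l with
  | nil =>
    intro cur prev hinv
    have hmem : ∀ x ∈ cur, ¬ ((x == '_') = true) := by
      intro x hx
      by_cases h : cur = []
      · simp [h] at hx
      · have hm : '_' ∉ cur := by
          have h2 := hinv; rw [pvInv, if_neg h] at h2; exact h2.2
        simp only [beq_iff_eq]; rintro rfl; exact hm hx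
    rw [pvGomark, List.append_nil, List.splitOnP_eq_single _ _ hmem]
    by_cases h : cur = [] <;> simp [pvW, h]
  | cons c r ih =>
    intro cur prev hinv
    have hcurmem : '_' ∉ cur := by
      by_cases h : cur = []
      · simp [h]
      · have h2 := hinv; rw [pvInv, if_neg h] at h2; exact h2.2
    by_cases hc : c = '_'
    · subst hc
      have hup : PySem.Chars.isupper '_' = false := by decide
      have hmark : to_title_mark prev '_' = ['_'] := by simp [to_title_mark, hup]
      rw [pvGomark, hmark,
        show cur ++ (['_'] ++ pvGomark '_' r) = cur ++ '_' :: pvGomark '_' r by simp,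
        pvSplit_sep cur _ hcurmem, List.filter_cons]
      have hpre : pvInv '_' ([] : List Char) := by simp [pvInv]
      have hIH := ih [] '_' hpre
      rw [List.nil_append] at hIH
      rw [hIH]
      by_cases h : cur = [] <;> simp [pvW, h]
    · by_cases hM : PySem.Chars.isupper c = true ∧ prev ≠ '_' ∧ PySem.Chars.isupper prev = false
      · -- boundary: a '_' is inserted before c
        have hcur : cur ≠ [] := by
          intro h
          have : prev = '_' := by
            have h2 := hinv; rw [pvInv, if_pos h] at h2; exact h2
          exact hM.2.1 this
        have hmark : to_title_mark prev c = ['_', c] := by rw [to_title_mark, if_pos hM]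
        rw [pvGomark, hmark,
          show cur ++ (['_', c] ++ pvGomark c r) = cur ++ '_' :: ([c] ++ pvGomark c r) by simp,
          pvSplit_sep cur _ hcurmem, List.filter_cons]
        have hpre : pvInv c [c] := by simp [pvInv, Ne.symm hc]
        rw [ih [c] c hpre]
        have : pvW cur prev (c :: r) = cur :: pvW [c] c r := by
          simp only [pvW, if_neg hc]
          rw [if_pos ⟨hM.1, hcur, hM.2.2⟩]
        rw [this]
        simp [hcur]
      · -- no boundary: c extends the current chunk
        have hmark : to_title_mark prev c = [c] := by rw [to_title_mark, if_neg hM]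
        rw [pvGomark, hmark,
          show cur ++ ([c] ++ pvGomark c r) = (cur ++ [c]) ++ pvGomark c r by simp]
        have hpre : pvInv c (cur ++ [c]) := by
          simp [pvInv, hcurmem, Ne.symm hc]
        rw [ih (cur ++ [c]) c hpre]
        have hno : ¬ (PySem.Chars.isupper c = true ∧ cur ≠ [] ∧ PySem.Chars.isupper prev = false) := by
          rintro ⟨h1, h2, h3⟩
          have hprev : prev ≠ '_' := by
            have hl : cur.getLast? = some prev := by
              have hh := hinv; rw [pvInv, if_neg h2] at hh; exact hh.1
            intro hp; subst hp
            exact hcurmem (List.mem_of_getLast? hl)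
          exact hM ⟨h1, hprev, h3⟩
        simp only [pvW, if_neg hc]
        rw [if_neg hno]

-- ===== VERDICT (by name: the statement is the Claim_ definition above) =====
theorem to_title_py_spec : Claim_equal_to_title_py := by
  intro name _
  unfold Spec_to_title_py
  simp only [to_title_py, to_title_py_alt]
  by_cases hnil : name.toList = []
  · simp [hnil, PySem.Chars.join, List.intercalate]
  · rw [if_neg hnil]
    cases hs : name.toList.dropWhile (· == '_') with
    | nil =>
      simp [PySem.Chars.join, List.intercalate]
    | cons p r =>
      have hp : p ≠ '_' := by
        have hne : name.toList.dropWhile (· == '_') ≠ [] := by simp [hs]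
        have := List.head_dropWhile_not (p := (· == '_')) (l := name.toList) hne
        simp_all
      rw [pvA_fold (p :: r) [] [] '_' (by simp [pvInv])]
      rw [List.nil_append]
      have hwA : pvW ([] : List Char) '_' (p :: r) = pvW [p] p r := by
        simp [pvW, hp]
      rw [hwA]
      rw [show (p :: r).take 1 = [p] by simp,
        show List.drop 1 (p :: r) = r from rfl,
        pvGomark_eq r p,
        pvB_split r [p] p (by simp [pvInv, Ne.symm hp])]
      rw [if_pos (pvW_ne_nil r [p] p (by simp))]
      have hcap : to_title_capA = fun w => PySem.Chars.upper (List.take 1 w) ++ w.tail := by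
        funext w; simp [to_title_capA, List.drop_one]
      rw [hcap]
      simp [List.drop_one]
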